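-- pv_equiv track=rewrite | github.com/anand0906/DataStructures-Algorithms | Prefix Sum/Problems/Smallest Substring Containing Vowels in Even Counts.py | optimized
-- ===== SOURCE A (Python) =====
-- def optimized(n,word):
--     prefix={0:-1}
--     currentXor=0
--     mini=n+1
--     for i in range(n):
--         if(word[i] in 'aeiou'):
--             mask=1<<(ord(word[i])-ord('a'))
--             currentXor^=mask
--         if(currentXor in prefix):
--             length=i-prefix[currentXor]
--             mini=min(mini,length)
--         prefix[currentXor]=i
--     return mini
-- ===== SOURCE B (Python) =====
-- def optimized(n, word):
--     mini = n + 1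
--     for i in range(n):
--         mask = 0
--         for j in range(i, n):
--             c = word[j]
--             if c in 'aeiou':
--                 mask ^= 1 << (ord(c) - ord('a'))
--             if mask == 0:
--                 mini = min(mini, j - i + 1)
--     return mini
-- ===== Notes on version B (the rewrite author's own statement) =====
-- stated objective: alternative
-- what changed: A's single pass with a hashmap of first/last-seen prefix parity states is replaced by a brute-force double loop that rebuilds a running vowel-parity mask for every start index and records every all-even substring length.
import Mathlib
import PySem

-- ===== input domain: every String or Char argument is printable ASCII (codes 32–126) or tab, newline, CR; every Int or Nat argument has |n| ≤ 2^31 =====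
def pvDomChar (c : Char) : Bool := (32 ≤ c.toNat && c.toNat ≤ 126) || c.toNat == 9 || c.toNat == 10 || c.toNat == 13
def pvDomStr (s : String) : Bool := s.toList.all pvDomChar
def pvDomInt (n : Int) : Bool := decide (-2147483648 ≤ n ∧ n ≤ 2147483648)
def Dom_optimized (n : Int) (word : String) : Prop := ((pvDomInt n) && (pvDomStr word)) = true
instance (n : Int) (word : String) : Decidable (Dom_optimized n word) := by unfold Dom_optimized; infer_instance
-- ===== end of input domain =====

-- B replaces A's one-pass prefix-parity hashmap with a direct double loop over all substrings
-- (objective: alternative algorithm, no dict; return values proved equal on Pre_).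

-- ===== PORT A =====
-- literal port of Source A: prefix dict of first..last seen parity states, single left-to-right pass
def optimized (n : Int) (word : String) : Int :=
  let st0 : PySem.Dict Int Int × Int × Int := (PySem.Dict.ofList [(0, -1)], 0, n + 1)
  let r := (PySem.List.pyRange 0 n 1).foldl (fun st i =>
    let c := (PySem.Str.pyGet? word i).getD ' '  -- word[i]; Pre_ keeps i in range
    -- 'word[i] in "aeiou"' then mask = 1 << (ord(word[i]) - ord('a')); the shift amount is a Nat
    -- (Python-equal on the vowel branch, where ord c ≥ ord 'a')
    let cur := if c ∈ ['a', 'e', 'i', 'o', 'u'] then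
        PySem.Int.bxor st.2.1 ((1 : Int) <<< (c.toNat - 97)) else st.2.1
    let mini := if st.1.contains cur then min st.2.2 (i - st.1.getD cur 0) else st.2.2
    (st.1.insert cur i, cur, mini)) st0
  r.2.2

-- ===== PORT B =====
-- literal port of Source B: brute-force scan of every substring, running parity mask per start
def optimized_alt (n : Int) (word : String) : Int :=
  (PySem.List.pyRange 0 n 1).foldl (fun mini i =>
    ((PySem.List.pyRange i n 1).foldl (fun st j =>
      let c := (PySem.Str.pyGet? word j).getD ' '  -- word[j]; Pre_ keeps j in range
      let mask := if c ∈ ['a', 'e', 'i', 'o', 'u'] then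
          PySem.Int.bxor st.1 ((1 : Int) <<< (c.toNat - 97)) else st.1
      let mini := if mask = 0 then min st.2 (j - i + 1) else st.2
      (mask, mini)) ((0 : Int), mini)).2) (n + 1)

-- ===== PRECONDITION & SPEC =====
-- Pre_ excludes exactly the inputs where both Pythons raise IndexError: word[i] with n > len(word).
def Pre_optimized (n : Int) (word : String) : Prop := n ≤ PySem.Str.len word
instance (n : Int) (word : String) : Decidable (Pre_optimized n word) := by
  unfold Pre_optimized; infer_instance
def pvWitness_optimized : Int × String := (6, "baeiou")

def Spec_optimized (n : Int) (word : String) (out : Int) : Prop := out = optimized_alt n word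
instance (n : Int) (word : String) (out : Int) : Decidable (Spec_optimized n word out) := by
  unfold Spec_optimized; infer_instance

-- ===== CLAIM (what is proved, stated in full; the proofs are below) =====
def Claim_equal_optimized : Prop := ∀ (n : Int) (word : String), Dom_optimized n word →
  Pre_optimized n word → Spec_optimized n word (optimized n word)

-- ===== LEMMAS AND PROOFS =====

-- parity state machine: Nat-valued vowel-parity mask of a prefix
def sstep (x : Nat) (c : Char) : Nat :=
  if c ∈ ['a', 'e', 'i', 'o', 'u'] then x ^^^ (1 <<< (c.toNat - 97)) else x

def pst (cs : List Char) (k : Nat) : Nat := (cs.take k).foldl sstep 0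

-- last prefix index ≤ t whose state (as the Int the dict keys carry) is v
def locc (cs : List Char) (t : Nat) (v : Int) : Option Nat :=
  ((List.range (t + 1)).reverse).find? (fun k => (pst cs k : Int) == v)

-- all gap lengths b - a over pairs a < b ≤ t of equal prefix states, grouped by b
def gaps (cs : List Char) (t : Nat) : List Int :=
  (List.range (t + 1)).flatMap (fun b => (List.range b).filterMap
    (fun a => if pst cs a = pst cs b then some ((b : Int) - (a : Int)) else none))

-- candidates contributed by start position i after u inner steps (value = d+1 = (i+d+1) - i)
def row (cs : List Char) (i : Nat) (u : Nat) : List Int :=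
  (List.range u).filterMap
    (fun d => if pst cs (i + d + 1) = pst cs i then some ((d : Int) + 1) else none)

lemma shift_one_natCast (k : Nat) : (1 : Int) <<< k = ((1 <<< k : Nat) : Int) := by
  simp [Int.shiftLeft_eq, Nat.shiftLeft_eq]

lemma pst_succ (cs : List Char) (t : Nat) (ht : t < cs.length) :
    pst cs (t + 1) = sstep (pst cs t) cs[t] := by
  unfold pst
  rw [List.take_add_one, List.getElem?_eq_getElem ht]
  simp only [Option.toList_some, List.foldl_append, List.foldl_cons, List.foldl_nil]

lemma foldl_min_le_init (L : List Int) (x : Int) : L.foldl min x ≤ x :=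
  (PySem.List.foldl_min_le L x).1

lemma foldl_min_eq_min {L : List Int} {c : Int} (x : Int)
    (hmem : c ∈ L) (hall : ∀ y ∈ L, c ≤ y) : L.foldl min x = min x c := by
  apply le_antisymm
  · exact le_min (foldl_min_le_init L x) ((PySem.List.foldl_min_le L x).2 c hmem)
  · rcases PySem.List.foldl_min_mem L x with h | h
    · rw [h]; exact min_le_left _ _
    · exact le_trans (min_le_right _ _) (hall _ h)

lemma foldl_min_congr {L₁ L₂ : List Int} (x : Int)
    (h : ∀ y, y ∈ L₁ ↔ y ∈ L₂) : L₁.foldl min x = L₂.foldl min x := by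
  apply le_antisymm
  · rcases PySem.List.foldl_min_mem L₂ x with h2 | h2
    · rw [h2]; exact foldl_min_le_init L₁ x
    · exact (PySem.List.foldl_min_le L₁ x).2 _ ((h _).mpr h2)
  · rcases PySem.List.foldl_min_mem L₁ x with h1 | h1
    · rw [h1]; exact foldl_min_le_init L₂ x
    · exact (PySem.List.foldl_min_le L₂ x).2 _ ((h _).mp h1)

lemma locc_succ (cs : List Char) (t : Nat) (v : Int) :
    locc cs (t + 1) v = if (pst cs (t + 1) : Int) = v then some (t + 1) else locc cs t v := by
  unfold locc
  rw [List.range_succ, List.reverse_append]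
  simp only [List.reverse_cons, List.reverse_nil, List.nil_append, List.singleton_append,
    List.find?_cons]
  by_cases h : (pst cs (t + 1) : Int) = v
  · simp only [h, beq_self_eq_true, if_pos]
  · rw [show ((pst cs (t + 1) : Int) == v) = false from beq_eq_false_iff_ne.mpr h, if_neg h]

lemma locc_zero (cs : List Char) (v : Int) :
    locc cs 0 v = if (pst cs 0 : Int) = v then some 0 else none := by
  unfold locc
  rw [List.range_one]
  by_cases h : (pst cs 0 : Int) = v
  · simp only [h, beq_self_eq_true, List.reverse_cons, List.reverse_nil, List.nil_append,
      List.find?_cons, if_pos]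
  · simp only [List.reverse_cons, List.reverse_nil, List.nil_append, List.find?_cons,
      List.find?_nil]
    rw [show ((pst cs 0 : Int) == v) = false from beq_eq_false_iff_ne.mpr h, if_neg h]

lemma locc_none (cs : List Char) (t : Nat) (v : Int) :
    locc cs t v = none ↔ ∀ k, k ≤ t → (pst cs k : Int) ≠ v := by
  induction t with
  | zero =>
    rw [locc_zero]
    split_ifs with h
    · constructor
      · intro hc; cases hc
      · intro hc; exact absurd h (hc 0 (le_refl 0))
    · constructor
      · intro _ k hk
        have : k = 0 := by omega
        subst this; exact h
      · intro _; rfl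
  | succ t ih =>
    rw [locc_succ]
    split_ifs with h
    · simp only [false_iff]
      intro hc; exact hc (t+1) (le_refl _) h
    · rw [ih]
      constructor
      · intro hc k hk
        rcases Nat.lt_or_ge k (t+1) with hlt | hge
        · exact hc k (by omega)
        · have : k = t + 1 := by omega
          subst this; exact h
      · intro hc k hk; exact hc k (by omega)

lemma locc_spec (cs : List Char) (t : Nat) (v : Int) (k : Nat)
    (h : locc cs t v = some k) :
    k ≤ t ∧ (pst cs k : Int) = v ∧ ∀ j, j ≤ t → (pst cs j : Int) = v → j ≤ k := by
  induction t with
  | zero =>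
    rw [locc_zero] at h
    split_ifs at h with hv
    · cases h
      exact ⟨le_refl 0, hv, fun j hj _ => hj⟩
  | succ t ih =>
    rw [locc_succ] at h
    split_ifs at h with hv
    · cases h
      exact ⟨le_refl _, hv, fun j hj _ => hj⟩
    · obtain ⟨h1, h2, h3⟩ := ih h
      refine ⟨by omega, h2, fun j hj hjv => ?_⟩
      rcases Nat.lt_or_ge j (t+1) with hlt | hge
      · exact h3 j (by omega) hjv
      · have : j = t + 1 := by omega
        subst this; exact absurd hjv hv

lemma gaps_succ (cs : List Char) (t : Nat) :
    gaps cs (t + 1) = gaps cs t ++ (List.range (t + 1)).filterMap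
      (fun a => if pst cs a = pst cs (t + 1) then some (((t : Int) + 1) - (a : Int)) else none) := by
  unfold gaps
  rw [List.range_succ, List.flatMap_append]
  simp [Nat.cast_add]

lemma sstep_xor (a p : Nat) (c : Char) : sstep (a ^^^ p) c = sstep a c ^^^ p := by
  unfold sstep
  split_ifs with h
  · rw [Nat.xor_assoc, Nat.xor_comm p _, ← Nat.xor_assoc]
  · rfl

-- the Nat-cast bridge for one loop-body mask update
lemma mask_step_cast (c : Char) (a : Nat) :
    (if c ∈ ['a', 'e', 'i', 'o', 'u'] then
        PySem.Int.bxor (a : Int) ((1 : Int) <<< (c.toNat - 97)) else (a : Int))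
      = ((sstep a c : Nat) : Int) := by
  unfold sstep
  split_ifs with h
  · rw [shift_one_natCast, PySem.Int.bxor_natCast]
  · rfl

-- ===== A-side invariant =====

lemma A_inv (word : String) (n : Int) (t : Nat) (ht : t ≤ word.toList.length) :
    ∃ d : PySem.Dict Int Int,
      ((List.range t).foldl (fun (st : PySem.Dict Int Int × Int × Int) (k : Nat) =>
        (fun (st : PySem.Dict Int Int × Int × Int) (i : Int) =>
          let c := (PySem.Str.pyGet? word i).getD ' '
          let cur := if c ∈ ['a', 'e', 'i', 'o', 'u'] then
              PySem.Int.bxor st.2.1 ((1 : Int) <<< (c.toNat - 97)) else st.2.1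
          let mini := if st.1.contains cur then min st.2.2 (i - st.1.getD cur 0) else st.2.2
          (st.1.insert cur i, cur, mini)) st ((0 : Int) + (k : Int)))
        (PySem.Dict.ofList [(0, -1)], 0, n + 1))
      = (d, ((pst word.toList t : Nat) : Int), (gaps word.toList t).foldl min (n + 1))
      ∧ ∀ v : Int, d.get? v = (locc word.toList t v).map (fun (k : Nat) => (k : Int) - 1) := by
  induction t with
  | zero =>
    refine ⟨PySem.Dict.ofList [(0, -1)], ?_, ?_⟩
    · simp [pst, gaps]
    · intro v
      rw [locc_zero]
      by_cases hv : ((pst word.toList 0 : Nat) : Int) = v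
      · rw [if_pos hv]
        have h0 : v = 0 := by simp [pst] at hv; omega
        subst h0
        rfl
      · rw [if_neg hv]
        have h0 : v ≠ 0 := by simp [pst] at hv; omega
        simp only [Option.map_none]
        show (PySem.Dict.mk [(0, -1)]).get? v = none
        rw [PySem.Dict.get?_mk_cons]
        rw [show ((0 : Int) == v) = false from beq_eq_false_iff_ne.mpr (fun hc => h0 hc.symm)]
        rfl
  | succ t ih =>
    have ht' : t < word.toList.length := by omega
    obtain ⟨d, hfold, hd⟩ := ih (by omega)
    rw [List.range_succ, List.foldl_append, hfold]
    simp only [List.foldl_cons, List.foldl_nil]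
    have hc : (PySem.Str.pyGet? word ((0 : Int) + (t : Int))).getD ' ' = word.toList[t] := by
      rw [zero_add]
      simp [List.getElem?_eq_getElem ht']
    rw [hc, mask_step_cast, ← pst_succ word.toList t ht']
    set cs := word.toList
    set w : Int := ((pst cs (t + 1) : Nat) : Int) with hw
    refine ⟨d.insert w ((0 : Int) + (t : Int)), ?_, ?_⟩
    · -- value components
      refine Prod.ext rfl (Prod.ext rfl ?_)
      show (if d.contains w then
          min ((gaps cs t).foldl min (n + 1)) ((0 : Int) + (t : Int) - d.getD w 0)
        else (gaps cs t).foldl min (n + 1)) = (gaps cs (t + 1)).foldl min (n + 1)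
      rw [gaps_succ, List.foldl_append]
      rw [PySem.Dict.contains_eq_isSome_get?, hd w]
      cases hlo : locc cs t w with
      | none =>
        have hempty : (List.range (t + 1)).filterMap
            (fun a => if pst cs a = pst cs (t + 1) then some (((t : Int) + 1) - (a : Int)) else none)
            = [] := by
          rw [List.filterMap_eq_nil_iff]
          intro a ha
          rw [List.mem_range] at ha
          rw [if_neg]
          intro hpa
          exact (locc_none cs t w).mp hlo a (by omega) (by rw [hw]; exact_mod_cast hpa)
        rw [hempty]
        rfl
      | some k =>
        obtain ⟨hk1, hk2, hk3⟩ := locc_spec cs t w k hlo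
        have hmin : ((List.range (t + 1)).filterMap
            (fun a => if pst cs a = pst cs (t + 1) then some (((t : Int) + 1) - (a : Int)) else none)).foldl
            min ((gaps cs t).foldl min (n + 1))
            = min ((gaps cs t).foldl min (n + 1)) (((t : Int) + 1) - (k : Int)) := by
          apply foldl_min_eq_min
          · rw [List.mem_filterMap]
            refine ⟨k, List.mem_range.mpr (by omega), ?_⟩
            rw [if_pos (by rw [hw] at hk2; exact_mod_cast hk2)]
          · intro y hy
            rw [List.mem_filterMap] at hy
            obtain ⟨a, ha, hay⟩ := hy
            rw [List.mem_range] at ha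
            split_ifs at hay with hpa
            · cases hay
              have : a ≤ k := hk3 a (by omega) (by rw [hw]; exact_mod_cast hpa)
              omega
        rw [hmin]
        simp only [Option.map_some, Option.isSome_some, if_true]
        rw [PySem.Dict.getD_eq_get?_getD, hd w, hlo]
        simp only [Option.map_some, Option.getD_some]
        congr 1
        ring
    · -- dict characterization
      intro v
      rw [PySem.Dict.get?_insert, locc_succ]
      by_cases hv : v = w
      · rw [if_pos hv, if_pos (by rw [hv]), Option.map_some]
        congr 1
        push_cast
        ring
      · rw [if_neg hv, if_neg (by intro hc; exact hv (by rw [← hc]))]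
        exact hd v

-- ===== B-side invariants =====

lemma B_inner_inv (word : String) (i u : Nat) (hu : i + u ≤ word.toList.length) (x : Int) :
    ((List.range u).foldl (fun (st : Int × Int) (k : Nat) =>
      (fun (st : Int × Int) (j : Int) =>
        let c := (PySem.Str.pyGet? word j).getD ' '
        let mask := if c ∈ ['a', 'e', 'i', 'o', 'u'] then
            PySem.Int.bxor st.1 ((1 : Int) <<< (c.toNat - 97)) else st.1
        let mini := if mask = 0 then min st.2 (j - (i : Int) + 1) else st.2
        (mask, mini)) st ((i : Int) + (k : Int)))
      ((0 : Int), x))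
    = (((pst word.toList (i + u) ^^^ pst word.toList i : Nat) : Int),
       (row word.toList i u).foldl min x) := by
  induction u generalizing x with
  | zero =>
    simp [row, Nat.xor_self]
  | succ u ih =>
    have hlen : i + u < word.toList.length := by omega
    rw [List.range_succ, List.foldl_append, ih (by omega) x]
    simp only [List.foldl_cons, List.foldl_nil]
    have hidx : (i : Int) + (u : Int) = ((i + u : Nat) : Int) := by push_cast; ring
    have hc : (PySem.Str.pyGet? word ((i : Int) + (u : Int))).getD ' ' = word.toList[i + u] := by
      rw [hidx, PySem.Str.pyGet?_natCast, List.getElem?_eq_getElem hlen]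
      rfl
    rw [hc, mask_step_cast, sstep_xor, ← pst_succ word.toList (i + u) hlen]
    set cs := word.toList
    have hrow : row cs i (u + 1) = row cs i u ++
        (if pst cs (i + u + 1) = pst cs i then [((u : Int) + 1)] else []) := by
      unfold row
      rw [List.range_succ, List.filterMap_append]
      congr 1
      simp only [List.filterMap_cons, List.filterMap_nil]
      split_ifs <;> rfl
    rw [hrow, List.foldl_append]
    by_cases hp : pst cs (i + u + 1) = pst cs i
    · rw [if_pos (show ((pst cs (i + u + 1) ^^^ pst cs i : Nat) : Int) = 0 by
        rw [hp, Nat.xor_self]; rfl)]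
      rw [if_pos hp]
      simp only [List.foldl_cons, List.foldl_nil]
      refine Prod.ext rfl ?_
      show min ((row cs i u).foldl min x) ((i : Int) + (u : Int) - (i : Int) + 1)
          = min ((row cs i u).foldl min x) ((u : Int) + 1)
      congr 1
      ring
    · rw [if_neg (show ¬ ((pst cs (i + u + 1) ^^^ pst cs i : Nat) : Int) = 0 by
        intro h
        exact hp (Nat.xor_eq_zero_iff.mp (by exact_mod_cast h)))]
      rw [if_neg hp]
      simp only [List.foldl_nil]
      rfl

lemma foldl_min_flatMap {α : Type} (L : List α) (g : α → List Int) (x : Int) :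
    L.foldl (fun y i => (g i).foldl min y) x = (L.flatMap g).foldl min x := by
  induction L generalizing x with
  | nil => rfl
  | cons a L ih => simp [List.flatMap_cons, List.foldl_append, ih]

lemma mem_gaps (cs : List Char) (m : Nat) (y : Int) :
    y ∈ gaps cs m ↔ ∃ a b : Nat, a < b ∧ b ≤ m ∧ pst cs a = pst cs b ∧ y = (b : Int) - (a : Int) := by
  unfold gaps
  simp only [List.mem_flatMap, List.mem_filterMap, List.mem_range]
  constructor
  · rintro ⟨b, hb, a, ha, h⟩
    split_ifs at h with hp
    · cases h; exact ⟨a, b, ha, by omega, hp, rfl⟩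
  · rintro ⟨a, b, hab, hbm, hp, rfl⟩
    exact ⟨b, by omega, a, hab, by simp [hp]⟩

lemma mem_rows (cs : List Char) (m : Nat) (y : Int) :
    y ∈ (List.range m).flatMap (fun i => row cs i (m - i)) ↔
      ∃ a b : Nat, a < b ∧ b ≤ m ∧ pst cs a = pst cs b ∧ y = (b : Int) - (a : Int) := by
  unfold row
  simp only [List.mem_flatMap, List.mem_filterMap, List.mem_range]
  constructor
  · rintro ⟨i, hi, d, hd, h⟩
    split_ifs at h with hp
    · cases h
      exact ⟨i, i + d + 1, by omega, by omega, hp.symm, by push_cast; ring⟩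
  · rintro ⟨a, b, hab, hbm, hp, rfl⟩
    refine ⟨a, by omega, b - a - 1, by omega, ?_⟩
    have hb : a + (b - a - 1) + 1 = b := by omega
    rw [hb, if_pos hp.symm]
    congr 1
    omega

-- closed form for each port on Pre_
lemma optimized_eq_gaps (n : Int) (word : String) (h : Pre_optimized n word) :
    optimized n word = (gaps word.toList n.toNat).foldl min (n + 1) := by
  have hm : n.toNat ≤ word.toList.length := by
    unfold Pre_optimized at h
    simp only [PySem.Str.len_eq] at h
    omega
  obtain ⟨d, hfold, -⟩ := A_inv word n n.toNat hm
  unfold optimized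
  rw [PySem.List.pyRange_one, sub_zero]
  simp only [List.foldl_map]
  exact congrArg (fun p : PySem.Dict Int Int × Int × Int => p.2.2) hfold

lemma optimized_alt_eq_rows (n : Int) (word : String) (h : Pre_optimized n word) :
    optimized_alt n word
      = ((List.range n.toNat).flatMap (fun i => row word.toList i (n.toNat - i))).foldl min (n + 1) := by
  have hm : n.toNat ≤ word.toList.length := by
    unfold Pre_optimized at h
    simp only [PySem.Str.len_eq] at h
    omega
  unfold optimized_alt
  rw [PySem.List.pyRange_one, sub_zero, List.foldl_map]
  rw [← foldl_min_flatMap]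
  apply List.foldl_ext
  intro x k hk
  rw [List.mem_range] at hk
  have hn : 0 ≤ n := by
    by_contra hneg
    have : n.toNat = 0 := by omega
    omega
  have h1 : PySem.List.pyRange ((0 : Int) + (k : Int)) n 1
      = (List.range (n.toNat - k)).map (fun (d : Nat) => ((0 : Int) + (k : Int)) + (d : Int)) := by
    rw [PySem.List.pyRange_one]
    have hnk : (n - ((0 : Int) + (k : Int))).toNat = n.toNat - k := by omega
    rw [hnk]
  rw [h1, List.foldl_map]
  have h2 := B_inner_inv word k (n.toNat - k) (by omega) x
  have h3 : ((List.range (n.toNat - k)).foldl (fun (st : Int × Int) (d : Nat) =>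
      (fun (st : Int × Int) (j : Int) =>
        let c := (PySem.Str.pyGet? word j).getD ' '
        let mask := if c ∈ ['a', 'e', 'i', 'o', 'u'] then
            PySem.Int.bxor st.1 ((1 : Int) <<< (c.toNat - 97)) else st.1
        let mini := if mask = 0 then min st.2 (j - ((0 : Int) + (k : Int)) + 1) else st.2
        (mask, mini)) st (((0 : Int) + (k : Int)) + (d : Int)))
      ((0 : Int), x)).2 = (row word.toList k (n.toNat - k)).foldl min x := by
    rw [show ((0 : Int) + (k : Int)) = (k : Int) from zero_add _]
    rw [h2]
  exact h3

-- ===== VERDICT (by name: the statement is the Claim_ definition above) =====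
theorem optimized_spec : Claim_equal_optimized := by
  intro n word _ hpre
  unfold Spec_optimized
  rw [optimized_eq_gaps n word hpre, optimized_alt_eq_rows n word hpre]
  exact foldl_min_congr _ (fun y => (mem_gaps _ _ y).trans (mem_rows _ _ y).symm)
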